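-- pv_equiv track=rewrite | github.com/andreksp/HackerRankPython | HackerRankPython/Strings/strongPassword.py | minimumNumber
-- ===== SOURCE A (Python) =====
-- def minimumNumber(password):
--     total = 0
--
--     total += 0 if any(c.isdigit() for c in password) else 1
--     total += 0 if any(c.islower() for c in password) else 1
--     total += 0 if any(c.isupper() for c in password ) else 1
--     total += 0 if any(c in "!@#$%^&*()-+" for c in password ) else 1
--
--     if (len(password) + total < 6):
--         total += 6 - (len(password) + total)
--
--     return total
-- ===== SOURCE B (Python) =====
-- def minimumNumber(password):
--     # Iterative repair: simulate actually appending characters until the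
--     # password is strong, counting the additions.
--     SPECIALS = "!@#$%^&*()-+"
--     pw = list(password)
--     additions = 0
--     while True:
--         if not any(c.isdigit() for c in pw):
--             pw.append('1')
--         elif not any(c.islower() for c in pw):
--             pw.append('a')
--         elif not any(c.isupper() for c in pw):
--             pw.append('A')
--         elif not any(c in SPECIALS for c in pw):
--             pw.append('!')
--         elif len(pw) < 6:
--             pw.append('x')
--         else:
--             return additions
--         additions += 1
-- ===== Notes on version B (the rewrite author's own statement) =====
-- stated objective: alternative
-- what changed: B simulates iterative repair: it repeatedly appends a concrete character fixing one deficiency (missing class, then length) and counts the appends, instead of A's closed-form counting of missing classes plus an incremental length adjustment.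
import Mathlib
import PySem

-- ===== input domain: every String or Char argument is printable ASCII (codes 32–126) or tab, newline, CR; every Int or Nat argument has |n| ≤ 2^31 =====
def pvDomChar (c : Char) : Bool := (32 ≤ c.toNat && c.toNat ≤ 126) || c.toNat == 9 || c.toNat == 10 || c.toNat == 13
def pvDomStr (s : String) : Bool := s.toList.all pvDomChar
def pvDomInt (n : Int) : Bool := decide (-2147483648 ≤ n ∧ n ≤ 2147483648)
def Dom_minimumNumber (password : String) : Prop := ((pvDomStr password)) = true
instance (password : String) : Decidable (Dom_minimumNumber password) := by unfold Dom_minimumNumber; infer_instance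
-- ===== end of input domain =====

-- B replaces A's closed-form counting by an iterative-repair simulation: append one
-- concrete fixing character per round until the password is strong, counting rounds.

-- ===== PORT A =====
def minimumNumber (password : String) : Int :=
  let l := password.toList
  let total : Int := 0
  let total := total + (if l.any (fun c => PySem.Chars.isdigit c) then 0 else 1)
  let total := total + (if l.any (fun c => PySem.Chars.islower c) then 0 else 1)
  let total := total + (if l.any (fun c => PySem.Chars.isupper c) then 0 else 1)
  let total := total + (if l.any (fun c => "!@#$%^&*()-+".toList.contains c) then 0 else 1)
  if (l.length : Int) + total < 6 then total + (6 - ((l.length : Int) + total)) else total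

-- ===== PORT B =====
-- fuel makes the 'while True' loop total; 10 rounds always suffice (at most 6 repairs are ever needed)
def mnRepair : Nat → List Char → Int → Int
  | 0, _, additions => additions
  | fuel + 1, pw, additions =>
    if ¬ pw.any (fun c => PySem.Chars.isdigit c) then
      mnRepair fuel (pw ++ ['1']) (additions + 1)
    else if ¬ pw.any (fun c => PySem.Chars.islower c) then
      mnRepair fuel (pw ++ ['a']) (additions + 1)
    else if ¬ pw.any (fun c => PySem.Chars.isupper c) then
      mnRepair fuel (pw ++ ['A']) (additions + 1)
    else if ¬ pw.any (fun c => "!@#$%^&*()-+".toList.contains c) then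
      mnRepair fuel (pw ++ ['!']) (additions + 1)
    else if pw.length < 6 then
      mnRepair fuel (pw ++ ['x']) (additions + 1)
    else additions

def minimumNumber_alt (password : String) : Int :=
  mnRepair 10 password.toList 0

-- ===== PRECONDITION & SPEC =====
def Spec_minimumNumber (password : String) (out : Int) : Prop := out = minimumNumber_alt password
instance (password : String) (out : Int) : Decidable (Spec_minimumNumber password out) := by unfold Spec_minimumNumber; infer_instance

-- ===== CLAIM (what is proved, stated in full; the proofs are below) =====
def Claim_equal_minimumNumber : Prop := ∀ (password : String), Dom_minimumNumber password → Spec_minimumNumber password (minimumNumber password)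

-- ===== LEMMAS AND PROOFS =====

-- the strength deficit (A's value, written directly)
def mnAns (pw : List Char) : Int :=
  if (pw.length : Int)
      + ((if pw.any (fun c => PySem.Chars.isdigit c) then 0 else 1)
       + (if pw.any (fun c => PySem.Chars.islower c) then 0 else 1)
       + (if pw.any (fun c => PySem.Chars.isupper c) then 0 else 1)
       + (if pw.any (fun c => "!@#$%^&*()-+".toList.contains c) then 0 else 1)) < 6
  then 6 - (pw.length : Int)
  else (if pw.any (fun c => PySem.Chars.isdigit c) then 0 else 1)
     + (if pw.any (fun c => PySem.Chars.islower c) then 0 else 1)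
     + (if pw.any (fun c => PySem.Chars.isupper c) then 0 else 1)
     + (if pw.any (fun c => "!@#$%^&*()-+".toList.contains c) then 0 else 1)

theorem mnAns_bounds (pw : List Char) : 0 ≤ mnAns pw ∧ mnAns pw ≤ 6 := by
  unfold mnAns
  have : (0:Int) ≤ pw.length := Int.natCast_nonneg _
  split_ifs <;> omega

theorem mnAns_append_x (pw : List Char)
    (hd : pw.any (fun c => PySem.Chars.isdigit c) = true)
    (hl : pw.any (fun c => PySem.Chars.islower c) = true)
    (hu : pw.any (fun c => PySem.Chars.isupper c) = true)
    (hs : pw.any (fun c => "!@#$%^&*()-+".toList.contains c) = true)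
    (hlen : pw.length < 6) :
    mnAns (pw ++ ['x']) = mnAns pw - 1 := by
  unfold mnAns
  simp only [List.any_append, List.any_cons, List.any_nil, Bool.or_false, hd, hl, hu, hs,
    Bool.true_or, List.length_append, List.length_cons, List.length_nil,
    eq_self_iff_true, if_true]
  split_ifs <;> push_cast <;> omega

theorem mnAns_append_excl (pw : List Char)
    (hd : pw.any (fun c => PySem.Chars.isdigit c) = true)
    (hl : pw.any (fun c => PySem.Chars.islower c) = true)
    (hu : pw.any (fun c => PySem.Chars.isupper c) = true)
    (hs : ¬ pw.any (fun c => "!@#$%^&*()-+".toList.contains c) = true) :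
    mnAns (pw ++ ['!']) = mnAns pw - 1 := by
  unfold mnAns
  simp only [List.any_append, List.any_cons, List.any_nil, Bool.or_false, hd, hl, hu,
    Bool.true_or,
    show PySem.Chars.isdigit '!' = false from rfl,
    show PySem.Chars.islower '!' = false from rfl,
    show PySem.Chars.isupper '!' = false from rfl,
    show "!@#$%^&*()-+".toList.contains '!' = true from rfl,
    Bool.or_true, Bool.or_false, hs, eq_self_iff_true, if_true, if_false,
    List.length_append, List.length_cons, List.length_nil]
  split_ifs <;> push_cast <;> omega

theorem mnAns_append_A (pw : List Char)
    (hd : pw.any (fun c => PySem.Chars.isdigit c) = true)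
    (hl : pw.any (fun c => PySem.Chars.islower c) = true)
    (hu : ¬ pw.any (fun c => PySem.Chars.isupper c) = true) :
    mnAns (pw ++ ['A']) = mnAns pw - 1 := by
  unfold mnAns
  simp only [List.any_append, List.any_cons, List.any_nil, Bool.or_false, hd, hl,
    Bool.true_or,
    show PySem.Chars.isdigit 'A' = false from rfl,
    show PySem.Chars.islower 'A' = false from rfl,
    show PySem.Chars.isupper 'A' = true from rfl,
    show "!@#$%^&*()-+".toList.contains 'A' = false from rfl,
    Bool.or_true, Bool.or_false, hu, eq_self_iff_true, if_true, if_false,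
    List.length_append, List.length_cons, List.length_nil]
  split_ifs <;> push_cast <;> omega

theorem mnAns_append_a (pw : List Char)
    (hd : pw.any (fun c => PySem.Chars.isdigit c) = true)
    (hl : ¬ pw.any (fun c => PySem.Chars.islower c) = true) :
    mnAns (pw ++ ['a']) = mnAns pw - 1 := by
  unfold mnAns
  simp only [List.any_append, List.any_cons, List.any_nil, Bool.or_false, hd,
    Bool.true_or,
    show PySem.Chars.isdigit 'a' = false from rfl,
    show PySem.Chars.islower 'a' = true from rfl,
    show PySem.Chars.isupper 'a' = false from rfl,
    show "!@#$%^&*()-+".toList.contains 'a' = false from rfl,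
    Bool.or_true, Bool.or_false, hl, eq_self_iff_true, if_true, if_false,
    List.length_append, List.length_cons, List.length_nil]
  split_ifs <;> push_cast <;> omega

theorem mnAns_append_1 (pw : List Char)
    (hd : ¬ pw.any (fun c => PySem.Chars.isdigit c) = true) :
    mnAns (pw ++ ['1']) = mnAns pw - 1 := by
  unfold mnAns
  simp only [List.any_append, List.any_cons, List.any_nil, Bool.or_false,
    show PySem.Chars.isdigit '1' = true from rfl,
    show PySem.Chars.islower '1' = false from rfl,
    show PySem.Chars.isupper '1' = false from rfl,
    show "!@#$%^&*()-+".toList.contains '1' = false from rfl,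
    Bool.or_true, Bool.or_false, hd, eq_self_iff_true, if_true, if_false,
    List.length_append, List.length_cons, List.length_nil]
  split_ifs <;> push_cast <;> omega

theorem mnRepair_eq (fuel : Nat) (pw : List Char) (acc : Int)
    (h : mnAns pw ≤ fuel) : mnRepair fuel pw acc = acc + mnAns pw := by
  induction fuel generalizing pw acc with
  | zero =>
    have h0 := (mnAns_bounds pw).1
    have h' : mnAns pw ≤ 0 := by exact_mod_cast h
    simp only [mnRepair]
    omega
  | succ n ih =>
    have hcast : mnAns pw ≤ (n : Int) + 1 := by
      have := h; push_cast at this; omega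
    simp only [mnRepair]
    by_cases hd : pw.any (fun c => PySem.Chars.isdigit c) = true
    · by_cases hl : pw.any (fun c => PySem.Chars.islower c) = true
      · by_cases hu : pw.any (fun c => PySem.Chars.isupper c) = true
        · by_cases hs : pw.any (fun c => "!@#$%^&*()-+".toList.contains c) = true
          · by_cases hlen : pw.length < 6
            · have hstep := mnAns_append_x pw hd hl hu hs hlen
              have hfuel : mnAns (pw ++ ['x']) ≤ (n:Int) := by rw [hstep]; omega
              have h1 : 1 ≤ mnAns pw := by
                unfold mnAns
                have h6 : ((pw ++ ['x']).length : Int) ≥ 0 := Int.natCast_nonneg _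
                simp only [hd, hl, hu, hs, eq_self_iff_true, if_true]
                split_ifs <;> omega
              rw [if_neg (not_not_intro hd), if_neg (not_not_intro hl),
                  if_neg (not_not_intro hu), if_neg (not_not_intro hs), if_pos hlen,
                  ih _ _ hfuel, hstep]
              omega
            · have hz : mnAns pw = 0 := by
                unfold mnAns
                simp only [hd, hl, hu, hs, eq_self_iff_true, if_true]
                have h6 : (6:Int) ≤ pw.length := by exact_mod_cast Nat.le_of_not_lt hlen
                split_ifs <;> omega
              rw [if_neg (not_not_intro hd), if_neg (not_not_intro hl),
                  if_neg (not_not_intro hu), if_neg (not_not_intro hs), if_neg hlen, hz]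
              omega
          · have hstep := mnAns_append_excl pw hd hl hu hs
            have hfuel : mnAns (pw ++ ['!']) ≤ (n:Int) := by rw [hstep]; omega
            rw [if_neg (not_not_intro hd), if_neg (not_not_intro hl),
                if_neg (not_not_intro hu), if_pos hs,
                ih _ _ hfuel, hstep]
            omega
        · have hstep := mnAns_append_A pw hd hl hu
          have hfuel : mnAns (pw ++ ['A']) ≤ (n:Int) := by rw [hstep]; omega
          rw [if_neg (not_not_intro hd), if_neg (not_not_intro hl), if_pos hu,
              ih _ _ hfuel, hstep]
          omega
      · have hstep := mnAns_append_a pw hd hl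
        have hfuel : mnAns (pw ++ ['a']) ≤ (n:Int) := by rw [hstep]; omega
        rw [if_neg (not_not_intro hd), if_pos hl,
            ih _ _ hfuel, hstep]
        omega
    · have hstep := mnAns_append_1 pw hd
      have hfuel : mnAns (pw ++ ['1']) ≤ (n:Int) := by rw [hstep]; omega
      rw [if_pos hd, ih _ _ hfuel, hstep]
      omega

-- ===== VERDICT (by name: the statement is the Claim_ definition above) =====
theorem minimumNumber_spec : Claim_equal_minimumNumber := by
  intro password _
  unfold Spec_minimumNumber minimumNumber minimumNumber_alt
  rw [mnRepair_eq 10 _ 0 (by have := (mnAns_bounds password.toList).2; push_cast; omega)]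
  unfold mnAns
  dsimp only
  split_ifs <;> omega
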